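-- pv_equiv track=rewrite | github.com/NaveensaikumarDukka/certchallenge | backend/services/evaluation_service.py | _calculate_difficulty_distribution
-- ===== SOURCE A (Python) =====
-- from typing import List, Dict, Any, Optional
--
-- def _calculate_difficulty_distribution(questions: List[str]) -> Dict[str, int]:
--     """Calculate difficulty distribution of questions"""
--     distribution = {
--         'easy': 0,
--         'medium': 0,
--         'hard': 0
--     }
--
--     for question in questions:
--         # Simple heuristic for difficulty
--         word_count = len(question.split())
--         if word_count < 10:
--             distribution['easy'] += 1
--         elif word_count < 20:
--             distribution['medium'] += 1
--         else:
--             distribution['hard'] += 1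
--
--     return distribution
-- ===== SOURCE B (Python) =====
-- from typing import List, Dict
--
-- def _calculate_difficulty_distribution(questions: List[str]) -> Dict[str, int]:
--     """Calculate difficulty distribution of questions (three independent counting passes)"""
--     word_counts = [len(q.split()) for q in questions]
--     return {
--         'easy': sum(1 for wc in word_counts if wc < 10),
--         'medium': sum(1 for wc in word_counts if 10 <= wc < 20),
--         'hard': sum(1 for wc in word_counts if wc >= 20),
--     }
-- ===== Notes on version B (the rewrite author's own statement) =====
-- stated objective: simpler
-- what changed: Replaces the single mutate-a-dict loop with three independent counting passes over precomputed word counts, building the result dict in one literal expression.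
import Mathlib
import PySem

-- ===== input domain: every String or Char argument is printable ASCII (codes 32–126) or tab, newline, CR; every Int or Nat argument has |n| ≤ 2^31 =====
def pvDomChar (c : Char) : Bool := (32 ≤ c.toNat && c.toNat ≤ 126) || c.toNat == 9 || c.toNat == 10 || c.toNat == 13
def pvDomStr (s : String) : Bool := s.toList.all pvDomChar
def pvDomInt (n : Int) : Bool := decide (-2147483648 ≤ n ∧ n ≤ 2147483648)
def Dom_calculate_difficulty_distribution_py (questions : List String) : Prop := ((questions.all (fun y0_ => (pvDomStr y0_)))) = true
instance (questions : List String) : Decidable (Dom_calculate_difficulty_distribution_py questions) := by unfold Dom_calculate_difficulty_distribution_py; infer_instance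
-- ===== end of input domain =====

-- B replaces A's single mutate-a-dict loop by three independent counting passes over
-- precomputed word counts (objective: simpler).


-- ===== PORT A =====
-- literal transliteration: a dict initialised to easy/medium/hard = 0, one loop that
-- bumps the matching bucket with `distribution[key] += 1`, then the dict is returned
def calculate_difficulty_distribution_py (questions : List String) : List (String × Int) :=
  let distribution : PySem.Dict String Int :=
    PySem.Dict.mk [("easy", 0), ("medium", 0), ("hard", 0)]
  (questions.foldl (fun distribution question =>
    let word_count : Int := (PySem.Str.split₀ question).length
    if word_count < 10 then distribution.modify "easy" 0 (· + 1)
    else if word_count < 20 then distribution.modify "medium" 0 (· + 1)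
    else distribution.modify "hard" 0 (· + 1)) distribution).items

-- ===== PORT B =====
-- three independent counting passes over precomputed word counts
def calculate_difficulty_distribution_py_alt (questions : List String) : List (String × Int) :=
  let word_counts : List Int := questions.map (fun q => ((PySem.Str.split₀ q).length : Int))
  [("easy", (word_counts.countP (fun wc => wc < 10) : Int)),
   ("medium", (word_counts.countP (fun wc => 10 ≤ wc ∧ wc < 20) : Int)),
   ("hard", (word_counts.countP (fun wc => 20 ≤ wc) : Int))]

-- ===== PRECONDITION & SPEC =====
def Spec_calculate_difficulty_distribution_py (questions : List String) (out : List (String × Int)) : Prop := out = calculate_difficulty_distribution_py_alt questions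
instance (questions : List String) (out : List (String × Int)) : Decidable (Spec_calculate_difficulty_distribution_py questions out) := by unfold Spec_calculate_difficulty_distribution_py; infer_instance

-- ===== CLAIM (what is proved, stated in full; the proofs are below) =====
def Claim_equal_calculate_difficulty_distribution_py : Prop := ∀ (questions : List String), Dom_calculate_difficulty_distribution_py questions → Spec_calculate_difficulty_distribution_py questions (calculate_difficulty_distribution_py questions)

-- ===== LEMMAS AND PROOFS =====

-- invariant of A's loop: the dict keeps its three entries, each bucket accumulating its count
lemma pv_fold_dist (qs : List String) (a b c : Int) :
    qs.foldl (fun d q =>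
      let wc : Int := (PySem.Str.split₀ q).length
      if wc < 10 then d.modify "easy" 0 (· + 1)
      else if wc < 20 then d.modify "medium" 0 (· + 1)
      else d.modify "hard" 0 (· + 1))
      (PySem.Dict.mk [("easy", a), ("medium", b), ("hard", c)]) =
    PySem.Dict.mk
      [("easy", a + ((qs.map (fun q => ((PySem.Str.split₀ q).length : Int))).countP (fun wc => wc < 10) : Int)),
       ("medium", b + ((qs.map (fun q => ((PySem.Str.split₀ q).length : Int))).countP (fun wc => 10 ≤ wc ∧ wc < 20) : Int)),
       ("hard", c + ((qs.map (fun q => ((PySem.Str.split₀ q).length : Int))).countP (fun wc => 20 ≤ wc) : Int))] := by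
  induction qs generalizing a b c with
  | nil => simp
  | cons q qs ih =>
    simp only [List.foldl_cons, List.map_cons, List.countP_cons]
    set wc : Int := ((PySem.Str.split₀ q).length : Int) with hwc
    by_cases h1 : wc < 10
    · simp only [h1, if_pos]
      rw [show (PySem.Dict.mk [("easy", a), ("medium", b), ("hard", c)]).modify "easy" 0 (· + 1)
          = PySem.Dict.mk [("easy", a + 1), ("medium", b), ("hard", c)] from by
        simp [PySem.Dict.modify, PySem.Dict.insert, PySem.Dict.getD, PySem.Dict.get?]]
      rw [ih]
      have h2 : ¬ (10 ≤ wc ∧ wc < 20) := by omega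
      have h3 : ¬ (20 ≤ wc) := by omega
      simp only [h2, h3, decide_true, decide_false]
      norm_num; ring_nf
    · by_cases h2 : wc < 20
      · simp only [h1, h2, if_neg, if_pos, not_false_iff]
        rw [show (PySem.Dict.mk [("easy", a), ("medium", b), ("hard", c)]).modify "medium" 0 (· + 1)
            = PySem.Dict.mk [("easy", a), ("medium", b + 1), ("hard", c)] from by
          simp [PySem.Dict.modify, PySem.Dict.insert, PySem.Dict.getD, PySem.Dict.get?]]
        rw [ih]
        have h2' : (10 ≤ wc ∧ wc < 20) := by omega
        have h3 : ¬ (20 ≤ wc) := by omega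
        simp only [h2', h3, decide_false]
        norm_num; ring_nf
      · simp only [h1, h2, if_neg, not_false_iff]
        rw [show (PySem.Dict.mk [("easy", a), ("medium", b), ("hard", c)]).modify "hard" 0 (· + 1)
            = PySem.Dict.mk [("easy", a), ("medium", b), ("hard", c + 1)] from by
          simp [PySem.Dict.modify, PySem.Dict.insert, PySem.Dict.getD, PySem.Dict.get?]]
        rw [ih]
        have h2' : ¬ (10 ≤ wc ∧ wc < 20) := by omega
        have h3 : (20 ≤ wc) := by omega
        simp only [h3, decide_true, decide_false]
        norm_num; ring_nf

-- ===== VERDICT (by name: the statement is the Claim_ definition above) =====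
theorem calculate_difficulty_distribution_py_spec : Claim_equal_calculate_difficulty_distribution_py := by
  intro questions _
  unfold Spec_calculate_difficulty_distribution_py
  unfold calculate_difficulty_distribution_py calculate_difficulty_distribution_py_alt
  simp only []
  rw [pv_fold_dist]
  simp
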